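-- pv_equiv track=rewrite | github.com/zavu1on/informatic-homework | 212.py | f
-- ===== SOURCE A (Python) =====
-- def f(n):
--     b = bin(n)[2:]
--
--     if n % 2 == 0:
--         s = 0
--         for i in b:
--             s += int(i)
--         s = bin(s)[2:]
--         b += s
--     else:
--         b = '1' + b + '00'
--
--     return int(b, 2)
-- ===== SOURCE B (Python) =====
-- def f(n):
--     if n % 2:
--         return (n + (1 << n.bit_length())) << 2
--     p = n.bit_count()
--     return (n << p.bit_length()) + p
-- ===== Notes on version B (the rewrite author's own statement) =====
-- stated objective: simpler
-- what changed: B replaces A's binary-string round-trip (bin(), a digit-sum loop over the string, string concatenation, int(_,2)) with a closed-form arithmetic expression using bit_length and bit_count.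
-- outside the precondition, e.g. on f(-2): A raises ValueError, B returns -3
import Mathlib
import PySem

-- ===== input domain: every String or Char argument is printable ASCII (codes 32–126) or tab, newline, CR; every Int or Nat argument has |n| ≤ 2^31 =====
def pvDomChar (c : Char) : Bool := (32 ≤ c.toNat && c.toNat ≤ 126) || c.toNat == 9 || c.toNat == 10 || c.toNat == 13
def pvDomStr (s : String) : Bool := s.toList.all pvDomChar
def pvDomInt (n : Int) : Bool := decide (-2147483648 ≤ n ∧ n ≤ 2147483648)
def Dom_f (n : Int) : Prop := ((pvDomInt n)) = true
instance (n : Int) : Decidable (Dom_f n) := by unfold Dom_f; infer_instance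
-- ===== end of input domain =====

-- B replaces A's binary-string round-trip (bin / digit-sum loop / int(_,2)) with
-- closed-form integer arithmetic on bit_length and popcount (objective: simpler).

-- ===== PORT A =====

-- digits of bin(m)[2:] for m > 0, most significant first (exact for positive m)
def binGo (m : Nat) : List Char :=
  if h : m = 0 then []
  else binGo (m / 2) ++ [if m % 2 = 1 then '1' else '0']
decreasing_by exact Nat.div_lt_self (Nat.pos_of_ne_zero h) (by norm_num)

-- bin(m)[2:] as a list of characters (Python gives "0" for m = 0)
def pyBin (m : Nat) : List Char := if m = 0 then ['0'] else binGo m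

-- int(c) for a binary digit character (exact for '0'/'1', the only chars occurring here)
def charVal (c : Char) : Nat := if c = '1' then 1 else 0

-- int(b, 2) for a string of binary digit characters
def parseBin (xs : List Char) : Nat := xs.foldl (fun a c => a * 2 + charVal c) 0

-- literal transliteration of A; A raises on n < 0 (excluded by Pre_f), so n.toNat is exact here
def f (n : Int) : Int :=
  let b := pyBin n.toNat
  if n % 2 = 0 then
    let s := b.foldl (fun s c => s + charVal c) 0
    let s' := pyBin s
    Int.ofNat (parseBin (b ++ s'))
  else
    Int.ofNat (parseBin ('1' :: b ++ ['0', '0']))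

-- ===== PORT B =====

-- n.bit_length() (for n ≥ 0)
def bitLen (m : Nat) : Nat := if m = 0 then 0 else Nat.log2 m + 1

-- n.bit_count() (for n ≥ 0)
def popcount (m : Nat) : Nat :=
  if h : m = 0 then 0 else m % 2 + popcount (m / 2)
decreasing_by exact Nat.div_lt_self (Nat.pos_of_ne_zero h) (by norm_num)

def f_alt (n : Int) : Int :=
  if n % 2 ≠ 0 then
    (n + 2 ^ bitLen n.toNat) * 4
  else
    let p := popcount n.toNat
    n * 2 ^ bitLen p + Int.ofNat p

-- ===== PRECONDITION & SPEC =====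
-- Pre_f excludes negative n, on which A raises ValueError (bin(n)[2:] keeps the 'b').
def Pre_f (n : Int) : Prop := 0 ≤ n
instance (n : Int) : Decidable (Pre_f n) := by unfold Pre_f; infer_instance
def pvWitness_f : Int := 6

def Spec_f (n : Int) (out : Int) : Prop := out = f_alt n
instance (n : Int) (out : Int) : Decidable (Spec_f n out) := by unfold Spec_f; infer_instance

-- ===== CLAIM (what is proved, stated in full; the proofs are below) =====
def Claim_equal_f : Prop := ∀ (n : Int), Dom_f n → Pre_f n → Spec_f n (f n)

-- ===== LEMMAS AND PROOFS =====

theorem foldl_parse (xs : List Char) (a : Nat) :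
    xs.foldl (fun a c => a * 2 + charVal c) a = a * 2 ^ xs.length + parseBin xs := by
  induction xs generalizing a with
  | nil => simp [parseBin]
  | cons c xs ih =>
    simp only [List.foldl, List.length_cons, parseBin]
    rw [ih (a * 2 + charVal c), ih (0 * 2 + charVal c)]
    ring

theorem parseBin_append (xs ys : List Char) :
    parseBin (xs ++ ys) = parseBin xs * 2 ^ ys.length + parseBin ys := by
  unfold parseBin
  rw [List.foldl_append, foldl_parse]
  rfl

theorem log2_rec (m : Nat) (h : 2 ≤ m) : Nat.log2 m = Nat.log2 (m/2) + 1 := by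
  rw [Nat.log2_def, if_pos h]

theorem binGo_length (m : Nat) (hm : m ≠ 0) : (binGo m).length = bitLen m := by
  induction m using binGo.induct with
  | case1 => simp_all
  | case2 m h ih =>
    rw [binGo, dif_neg h, List.length_append]
    by_cases h2 : m / 2 = 0
    · have hm1 : m = 1 := by omega
      subst hm1
      simp [binGo, bitLen]
      decide
    · rw [ih h2]
      simp only [bitLen, if_neg h, if_neg h2, List.length_cons, List.length_nil]
      rw [log2_rec m (by omega)]

theorem parseBin_binGo (m : Nat) : parseBin (binGo m) = m := by
  induction m using binGo.induct with
  | case1 => simp [binGo, parseBin]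
  | case2 m h ih =>
    rw [binGo, dif_neg h, parseBin_append, ih]
    simp only [parseBin, List.length_cons, List.length_nil, List.foldl, charVal]
    rcases Nat.mod_two_eq_zero_or_one m with h2 | h2 <;> simp [h2] <;> try omega

theorem parseBin_pyBin (m : Nat) : parseBin (pyBin m) = m := by
  unfold pyBin
  split
  · simp [parseBin, charVal, *]
  · exact parseBin_binGo m

theorem digitSum_binGo (m : Nat) (a : Nat) :
    (binGo m).foldl (fun s c => s + charVal c) a = a + popcount m := by
  induction m using binGo.induct generalizing a with
  | case1 => simp [binGo, popcount]
  | case2 m h ih =>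
    rw [binGo, dif_neg h, List.foldl_append, ih]
    conv_rhs => rw [popcount]
    rw [dif_neg h]
    simp only [List.foldl, charVal]
    rcases Nat.mod_two_eq_zero_or_one m with h2 | h2 <;> simp [h2] <;> try omega

theorem digitSum_pyBin (m : Nat) :
    (pyBin m).foldl (fun s c => s + charVal c) 0 = popcount m := by
  unfold pyBin
  split
  · simp [popcount, charVal, *]
  · rw [digitSum_binGo]; omega

theorem popcount_eq_zero (m : Nat) (h : popcount m = 0) : m = 0 := by
  induction m using binGo.induct with
  | case1 => rfl
  | case2 m hm ih =>
    rw [popcount, dif_neg hm] at h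
    have h2 := ih (by omega)
    omega

theorem pyBin_length (m : Nat) : (pyBin m).length = if m = 0 then 1 else bitLen m := by
  unfold pyBin
  split
  · simp
  · rw [binGo_length m (by assumption)]

-- ===== VERDICT (by name: the statement is the Claim_ definition above) =====
theorem f_spec : Claim_equal_f := by
  intro n _ hpre
  obtain ⟨m, rfl⟩ := Int.eq_ofNat_of_zero_le hpre
  unfold Spec_f f f_alt
  simp only [Int.ofNat_eq_natCast, Int.toNat_natCast]
  by_cases he : m % 2 = 0
  · have he' : (m : Int) % 2 = 0 := by omega
    rw [if_pos he', if_neg (by simp [he'])]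
    rw [digitSum_pyBin, parseBin_append, parseBin_pyBin, parseBin_pyBin, pyBin_length]
    by_cases hp : popcount m = 0
    · have hm0 : m = 0 := popcount_eq_zero m hp
      subst hm0
      simp [hp, bitLen]
    · rw [if_neg hp]
      push_cast
      ring
  · have he' : ¬ (m : Int) % 2 = 0 := by omega
    rw [if_neg he', if_pos (by simpa using he')]
    have hm0 : m ≠ 0 := by omega
    rw [show ('1' :: pyBin m ++ ['0','0']) = (['1'] ++ pyBin m) ++ ['0','0'] by simp,
        parseBin_append, parseBin_append, parseBin_pyBin, pyBin_length, if_neg hm0]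
    simp [parseBin, charVal]
    ring
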